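-- pv_equiv track=rewrite | github.com/Lukasz1928/advent-of-code | solutions/2018/day07/task1/main.py | get_ready_nodes
-- ===== SOURCE A (Python) =====
-- def edges_to(node, edges):
--     return [x for x in edges if x[1] == node]
--
-- def get_ready_nodes(processes, nodes, edges):
--     ready = set()
--     for n in nodes:
--         if n not in processes:
--             all_predecessors_processed = True
--             for e in edges_to(n, edges):
--                 if e[0] not in processes:
--                     all_predecessors_processed = False
--                     break
--             if all_predecessors_processed:
--                 ready.add(n)
--     return ready
-- ===== SOURCE B (Python) =====
-- def get_ready_nodes(processes, nodes, edges):
--     blocked = set()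
--     for a, b in edges:
--         if a not in processes:
--             blocked.add(b)
--     return {n for n in nodes if n not in processes and n not in blocked}
-- ===== Notes on version B (the rewrite author's own statement) =====
-- stated objective: faster
-- what changed: Builds a 'blocked' set in one pass over the edges (targets of edges whose source is unprocessed) and then filters the node list against it, instead of re-scanning the whole edge list for predecessors of every node; the edges_to helper disappears.
import Mathlib
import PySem

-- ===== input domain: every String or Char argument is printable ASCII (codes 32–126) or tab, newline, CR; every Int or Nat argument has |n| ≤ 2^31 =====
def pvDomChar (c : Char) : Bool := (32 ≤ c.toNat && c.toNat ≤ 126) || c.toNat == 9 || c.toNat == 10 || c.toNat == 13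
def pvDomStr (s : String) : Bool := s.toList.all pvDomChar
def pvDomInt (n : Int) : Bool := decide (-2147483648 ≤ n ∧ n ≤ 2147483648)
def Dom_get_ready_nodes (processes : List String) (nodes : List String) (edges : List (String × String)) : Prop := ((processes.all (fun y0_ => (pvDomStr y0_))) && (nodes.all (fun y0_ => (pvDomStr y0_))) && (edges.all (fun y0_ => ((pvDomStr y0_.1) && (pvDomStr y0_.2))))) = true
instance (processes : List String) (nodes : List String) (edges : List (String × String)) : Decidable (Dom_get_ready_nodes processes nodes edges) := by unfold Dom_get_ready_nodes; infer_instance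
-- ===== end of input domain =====

-- B replaces A's per-node rescan of the edge list by a single pass building a
-- "blocked" set (targets of edges with unprocessed source) and a filter of the
-- node list against it, dropping the edges_to helper.


-- ===== PORT A =====
def edges_to (node : String) (edges : List (String × String)) : List (String × String) :=
  edges.filter (fun x => x.2 == node)

def get_ready_nodes (processes : List String) (nodes : List String) (edges : List (String × String)) : List String :=
  nodes.foldl (fun ready n =>
    if !(processes.contains n) then
      -- the flag-with-break inner loop: all predecessors processed
      if (edges_to n edges).all (fun e => processes.contains e.1) then
        PySem.Set.add ready n
      else ready
    else ready) PySem.Set.empty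

-- ===== PORT B =====
def get_ready_nodes_alt (processes : List String) (nodes : List String) (edges : List (String × String)) : List String :=
  let blocked : PySem.Set String :=
    edges.foldl (fun b e => if !(processes.contains e.1) then PySem.Set.add b e.2 else b) PySem.Set.empty
  PySem.Set.ofList (nodes.filter (fun n => !(processes.contains n) && !(PySem.Set.contains blocked n)))

-- ===== PRECONDITION & SPEC =====
def Spec_get_ready_nodes (processes : List String) (nodes : List String) (edges : List (String × String)) (out : List String) : Prop := out = get_ready_nodes_alt processes nodes edges
instance (processes : List String) (nodes : List String) (edges : List (String × String)) (out : List String) : Decidable (Spec_get_ready_nodes processes nodes edges out) := by unfold Spec_get_ready_nodes; infer_instance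

-- ===== CLAIM (what is proved, stated in full; the proofs are below) =====
def Claim_equal_get_ready_nodes : Prop := ∀ (processes : List String) (nodes : List String) (edges : List (String × String)), Dom_get_ready_nodes processes nodes edges → Spec_get_ready_nodes processes nodes edges (get_ready_nodes processes nodes edges)

-- ===== LEMMAS AND PROOFS =====

-- membership in B's blocked set: x was scattered in by some edge with unprocessed source
theorem mem_blocked (processes : List String) (edges : List (String × String))
    (s : PySem.Set String) (x : String) :
    (x ∈ edges.foldl (fun b e => if !(processes.contains e.1) then PySem.Set.add b e.2 else b) s) ↔
      (x ∈ s ∨ ∃ e ∈ edges, ¬ e.1 ∈ processes ∧ e.2 = x) := by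
  induction edges generalizing s with
  | nil => simp
  | cons e es ih =>
    rw [List.foldl_cons]
    cases hp : processes.contains e.1 with
    | true =>
      rw [show (if (!true) = true then PySem.Set.add s e.2 else s) = s from rfl, ih]
      have he1 : e.1 ∈ processes := by simpa using hp
      constructor
      · rintro (hs | ⟨f, hf, h1, h2⟩)
        · exact Or.inl hs
        · exact Or.inr ⟨f, List.mem_cons_of_mem _ hf, h1, h2⟩
      · rintro (hs | ⟨f, hf, h1, h2⟩)
        · exact Or.inl hs
        · rcases List.mem_cons.mp hf with rfl | hf
          · exact absurd he1 h1
          · exact Or.inr ⟨f, hf, h1, h2⟩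
    | false =>
      rw [show (if (!false) = true then PySem.Set.add s e.2 else s) = PySem.Set.add s e.2 from rfl, ih]
      have he1 : ¬ e.1 ∈ processes := by simpa using hp
      rw [PySem.Set.mem_add]
      constructor
      · rintro ((hs | rfl) | ⟨f, hf, h1, h2⟩)
        · exact Or.inl hs
        · exact Or.inr ⟨e, List.mem_cons_self .., he1, rfl⟩
        · exact Or.inr ⟨f, List.mem_cons_of_mem _ hf, h1, h2⟩
      · rintro (hs | ⟨f, hf, h1, h2⟩)
        · exact Or.inl (Or.inl hs)
        · rcases List.mem_cons.mp hf with rfl | hf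
          · exact Or.inl (Or.inr h2.symm)
          · exact Or.inr ⟨f, hf, h1, h2⟩

-- A's inner all-predecessors-processed check equals B's "not blocked"
theorem cond_eq (processes : List String) (edges : List (String × String)) (n : String) :
    ((edges_to n edges).all (fun e => processes.contains e.1)) =
      !(PySem.Set.contains
        (edges.foldl (fun b e => if !(processes.contains e.1) then PySem.Set.add b e.2 else b) PySem.Set.empty) n) := by
  simp only [edges_to]
  cases hc : PySem.Set.contains
      (edges.foldl (fun b e => if !(processes.contains e.1) then PySem.Set.add b e.2 else b) PySem.Set.empty) n with
  | true =>
    have hmem : n ∈ edges.foldl (fun b e => if !(processes.contains e.1) then PySem.Set.add b e.2 else b) PySem.Set.empty := by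
      simpa using hc
    rcases (mem_blocked processes edges PySem.Set.empty n).mp hmem with hs | ⟨e, he, h1, h2⟩
    · exact absurd hs (by simp [PySem.Set.empty])
    · simp only [Bool.not_true]
      rw [List.all_eq_false]
      exact ⟨e, List.mem_filter.mpr ⟨he, by simp [h2]⟩, by simpa using h1⟩
  | false =>
    have hmem : ¬ n ∈ edges.foldl (fun b e => if !(processes.contains e.1) then PySem.Set.add b e.2 else b) PySem.Set.empty := by
      simpa using hc
    simp only [Bool.not_false]
    rw [List.all_eq_true]
    intro e he
    rcases List.mem_filter.mp he with ⟨hee, hbeq⟩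
    by_contra hp
    exact hmem ((mem_blocked processes edges PySem.Set.empty n).mpr
      (Or.inr ⟨e, hee, by simpa using hp, by simpa using hbeq⟩))

-- A's fold over nodes equals B's filter-then-build-set, given cond_eq
theorem fold_eq (processes : List String) (edges : List (String × String))
    (nodes : List String) (s : PySem.Set String) :
    nodes.foldl (fun ready n =>
      if !(processes.contains n) then
        if (edges_to n edges).all (fun e => processes.contains e.1) then PySem.Set.add ready n else ready
      else ready) s =
    (nodes.filter (fun n => !(processes.contains n) &&
        !(PySem.Set.contains
          (edges.foldl (fun b e => if !(processes.contains e.1) then PySem.Set.add b e.2 else b) PySem.Set.empty) n))).foldl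
      PySem.Set.add s := by
  induction nodes generalizing s with
  | nil => rfl
  | cons n ns ih =>
    rw [List.foldl_cons, List.filter_cons, cond_eq processes edges n]
    cases hp : processes.contains n with
    | true => exact ih s
    | false =>
      cases hb : PySem.Set.contains
          (edges.foldl (fun b e => if !(processes.contains e.1) then PySem.Set.add b e.2 else b) PySem.Set.empty) n with
      | true => exact ih s
      | false => exact ih (PySem.Set.add s n)

-- ===== VERDICT (by name: the statement is the Claim_ definition above) =====
theorem get_ready_nodes_spec : Claim_equal_get_ready_nodes := by
  intro processes nodes edges _
  unfold Spec_get_ready_nodes get_ready_nodes get_ready_nodes_alt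
  rw [PySem.Set.ofList_eq_foldl, fold_eq]
  rfl
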